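-- pv_equiv track=rewrite | github.com/silvermaking/Algorithm-basic-training | jungol/Beginner_Coder/문자열/2604.그릇.py | plates_h
-- ===== SOURCE A (Python) =====
-- def plates_h(plates):
--     if plates:
--         height = 10
--     else:
--         return 0
--
--     n = len(plates)
--     for i in range(1, n):
--         if plates[i-1] != plates[i]:
--             height += 10
--         else:
--             height += 5
--
--     return height
-- ===== SOURCE B (Python) =====
-- def plates_h(plates):
--     # Run-length decomposition: walk the list run by run; each run of equal
--     # plates contributes 5 per plate plus 5 for being one group.
--     if not plates:
--         return 0
--     total = 0
--     n = len(plates)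
--     i = 0
--     while i < n:
--         j = i + 1
--         while j < n and plates[j] == plates[i]:
--             j += 1
--         total += 5 * (j - i) + 5
--         i = j
--     return total
-- ===== Notes on version B (the rewrite author's own statement) =====
-- stated objective: alternative
-- what changed: Replaces A's per-adjacent-pair conditional height accumulation by run-length decomposition: an outer loop skips each maximal run of equal plates with an inner scan and adds 5 per plate plus 5 per run.
import Mathlib
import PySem

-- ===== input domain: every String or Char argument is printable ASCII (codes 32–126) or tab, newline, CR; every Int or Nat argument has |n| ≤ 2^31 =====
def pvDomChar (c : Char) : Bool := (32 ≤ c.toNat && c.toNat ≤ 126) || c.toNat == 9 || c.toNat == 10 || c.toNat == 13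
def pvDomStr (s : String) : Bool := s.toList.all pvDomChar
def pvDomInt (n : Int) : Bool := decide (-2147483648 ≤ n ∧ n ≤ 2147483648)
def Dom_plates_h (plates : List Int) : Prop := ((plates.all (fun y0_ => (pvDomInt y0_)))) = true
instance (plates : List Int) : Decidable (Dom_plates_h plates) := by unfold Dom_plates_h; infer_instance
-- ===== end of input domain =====

-- B replaces A's per-adjacent-pair running-height loop by run-length decomposition:
-- an outer loop that skips each run of equal plates and adds 5 per plate plus 5 per run (objective: alternative).
-- ===== PORT A =====
def plates_h (plates : List Int) : Int :=
  if plates ≠ [] then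
    let n : Int := plates.length
    (PySem.List.pyRange 1 n 1).foldl
      (fun height i =>
        if PySem.List.pyGetD plates (i - 1) 0 ≠ PySem.List.pyGetD plates i 0 then
          height + 10
        else
          height + 5) 10
  else 0

-- ===== PORT B =====
-- inner while loop: 'j = i + 1; while j < n and plates[j] == plates[i]: j += 1'
-- (in-bounds Python indexing ported as getD; exact for 0 ≤ index < length;
--  fuel ≥ n - j bounds the iterations, making the loop a structural recursion)
def runEnd (plates : List Int) (n i : Nat) : Nat → Nat → Nat
  | 0, j => j
  | fuel + 1, j =>
    if j < n ∧ plates.getD j 0 = plates.getD i 0 then runEnd plates n i fuel (j + 1) else j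

-- outer while loop: 'while i < n: j = …; total += 5*(j-i)+5; i = j' (fuel ≥ n - i)
def outerLoop (plates : List Int) (n : Nat) : Nat → Nat → Int → Int
  | 0, _, total => total
  | fuel + 1, i, total =>
    if i < n then
      let j := runEnd plates n i n (i + 1)
      outerLoop plates n fuel j (total + 5 * ((j : Int) - (i : Int)) + 5)
    else total

def plates_h_alt (plates : List Int) : Int :=
  if plates = [] then 0
  else outerLoop plates plates.length plates.length 0 0

-- ===== PRECONDITION & SPEC =====
def Spec_plates_h (plates : List Int) (out : Int) : Prop := out = plates_h_alt plates
instance (plates : List Int) (out : Int) : Decidable (Spec_plates_h plates out) := by unfold Spec_plates_h; infer_instance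

-- ===== CLAIM (what is proved, stated in full; the proofs are below) =====
def Claim_equal_plates_h : Prop := ∀ (plates : List Int), Dom_plates_h plates → Spec_plates_h plates (plates_h plates)

-- ===== LEMMAS AND PROOFS =====

-- number of differing adjacent pairs
def dcount (l : List Int) : Nat := (l.zip l.tail).countP (fun p => decide (p.1 ≠ p.2))

-- length of the leading run of value v (proof-side model of the inner while loop)
def leadRun (v : Int) : List Int → Nat
  | [] => 0
  | y :: ys => if y = v then 1 + leadRun v ys else 0

lemma leadRun_le (v : Int) (t : List Int) : leadRun v t ≤ t.length := by
  induction t with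
  | nil => simp [leadRun]
  | cons y ys ih =>
    by_cases h : y = v
    · simp [leadRun, h]
      omega
    · simp [leadRun, h]

-- recursive model of B: strip the leading run, recurse on the rest
def altRec (plates : List Int) : Int :=
  match plates with
  | [] => 0
  | x :: t =>
    let k : Nat := leadRun x t + 1
    let rest := (x :: t).drop k
    if rest = [] then 5 + 5 * (k : Int)
    else 5 * (k : Int) + 5 + altRec rest
termination_by plates.length
decreasing_by
  simp only [List.drop_succ_cons, List.length_drop, List.length_cons]
  omega

lemma altRec_cons (x : Int) (t : List Int) :
    altRec (x :: t) =
      if t.drop (leadRun x t) = [] then 5 + 5 * ((leadRun x t + 1 : Nat) : Int)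
      else 5 * ((leadRun x t + 1 : Nat) : Int) + 5 + altRec (t.drop (leadRun x t)) := by
  rw [altRec]
  simp only [List.drop_succ_cons]

lemma altRec_cons' (x : Int) (t : List Int) :
    altRec (x :: t) =
      5 * ((leadRun x t + 1 : Nat) : Int) + 5 + altRec (t.drop (leadRun x t)) := by
  rw [altRec_cons]
  by_cases h : t.drop (leadRun x t) = []
  · rw [if_pos h, h]; simp [altRec]; ring
  · rw [if_neg h]

-- fold over range(1,n) with indexed lookups = fold over the adjacent-pair list
lemma map_range_eq_zip (plates : List Int) :
    (PySem.List.pyRange 1 (plates.length : Int) 1).map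
      (fun i => (PySem.List.pyGetD plates (i - 1) 0, PySem.List.pyGetD plates i 0))
      = plates.zip plates.tail := by
  apply List.ext_getElem
  · simp [PySem.List.length_pyRange_one]
  · intro k h1 h2
    simp only [List.getElem_map, PySem.List.getElem_pyRange_one, List.getElem_zip]
    have hk : k < plates.tail.length := by simpa using h2
    have hk' : k + 1 < plates.length := by
      rcases plates with _ | ⟨y, ys⟩ <;> simp_all
    have e1 : (1 : Int) + (k : Int) - 1 = ((k : Nat) : Int) := by omega
    have e2 : (1 : Int) + (k : Int) = (((k + 1 : Nat)) : Int) := by omega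
    rw [e1, e2]
    simp only [PySem.List.pyGetD_natCast]
    rw [List.getD_eq_getElem _ _ (by omega), List.getD_eq_getElem _ _ hk']
    simp [List.getElem_tail]

lemma foldl_pairs (L : List (Int × Int)) (init : Int) :
    L.foldl (fun h p => if p.1 ≠ p.2 then h + 10 else h + 5) init
      = init + 5 * L.length + 5 * (L.countP (fun p => decide (p.1 ≠ p.2)) : Nat) := by
  induction L generalizing init with
  | nil => simp
  | cons p t ih =>
    simp only [List.foldl_cons, List.countP_cons, ih, List.length_cons]
    by_cases h : p.1 = p.2 <;> simp [h] <;> omega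

-- A's closed value
lemma plates_h_closed (x : Int) (t : List Int) :
    plates_h (x :: t) = 10 + 5 * (t.length : Int) + 5 * (dcount (x :: t) : Nat) := by
  unfold plates_h
  simp only [ne_eq, reduceCtorEq, not_false_eq_true, if_true]
  calc (PySem.List.pyRange 1 ((x :: t).length : Int) 1).foldl
        (fun height i =>
          if PySem.List.pyGetD (x :: t) (i - 1) 0 ≠ PySem.List.pyGetD (x :: t) i 0 then
            height + 10 else height + 5) 10
      = ((PySem.List.pyRange 1 ((x :: t).length : Int) 1).map
          (fun i => (PySem.List.pyGetD (x :: t) (i - 1) 0,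
                     PySem.List.pyGetD (x :: t) i 0))).foldl
          (fun h p => if p.1 ≠ p.2 then h + 10 else h + 5) (10 : Int) := by
        rw [List.foldl_map]
    _ = ((x :: t).zip t).foldl
          (fun h p => if p.1 ≠ p.2 then h + 10 else h + 5) (10 : Int) := by
        rw [map_range_eq_zip]; rfl
    _ = 10 + 5 * (t.length : Int) + 5 * (dcount (x :: t) : Nat) := by
        rw [foldl_pairs]
        have : ((x :: t).zip t).length = t.length := by simp
        rw [this, dcount]
        norm_num

-- dcount of a list in terms of its leading run
lemma dcount_run (x : Int) (t : List Int) :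
    dcount (x :: t)
      = if t.drop (leadRun x t) = [] then 0 else 1 + dcount (t.drop (leadRun x t)) := by
  induction t generalizing x with
  | nil => simp [dcount, leadRun]
  | cons y ys ih =>
    by_cases h : y = x
    · subst h
      have h1 : dcount (y :: y :: ys) = dcount (y :: ys) := by simp [dcount]
      rw [h1]
      simpa [leadRun, Nat.add_comm] using ih y
    · have hx : x ≠ y := fun e => h e.symm
      have h1 : dcount (x :: y :: ys) = 1 + dcount (y :: ys) := by
        simp [dcount, hx]
        omega
      rw [h1]
      simp [leadRun, h]

-- B's recursive model has the same closed value
lemma altRec_closed_aux : ∀ (n : Nat) (l : List Int), l.length ≤ n → l ≠ [] →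
    altRec l = 10 + 5 * ((l.length : Int) - 1) + 5 * (dcount l : Nat) := by
  intro n
  induction n with
  | zero => intro l hl hne; cases l <;> simp_all
  | succ n ih =>
    rintro (_ | ⟨x, t⟩) hl hne
    · exact absurd rfl hne
    · rw [altRec_cons, dcount_run]
      have hle := leadRun_le x t
      by_cases hrest : t.drop (leadRun x t) = []
      · have hlen : leadRun x t = t.length := by
          have := List.drop_eq_nil_iff.mp hrest
          omega
        rw [if_pos hrest, if_pos hrest, hlen]
        simp only [List.length_cons]
        push_cast
        ring
      · have hdlen : (t.drop (leadRun x t)).length = t.length - leadRun x t := by simp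
        have hb := ih (t.drop (leadRun x t)) (by simp_all; omega) hrest
        rw [if_neg hrest, if_neg hrest, hb]
        have hpos : 0 < (t.drop (leadRun x t)).length := List.length_pos_iff.mpr hrest
        simp only [List.length_cons, hdlen] at *
        push_cast
        omega

-- the inner while loop computes the leading-run length of the suffix
lemma runEnd_eq (plates : List Int) (i : Nat) : ∀ (fuel j : Nat), j ≤ plates.length →
    plates.length - j ≤ fuel →
    runEnd plates plates.length i fuel j = j + leadRun (plates.getD i 0) (plates.drop j) := by
  intro fuel
  induction fuel with
  | zero =>
    intro j hj hf
    have : j = plates.length := by omega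
    subst this
    rw [runEnd, List.drop_length]
    simp [leadRun]
  | succ fuel ih =>
    intro j hj hf
    rw [runEnd]
    rcases Nat.lt_or_ge j plates.length with hjlt | hjge
    · have hdrop : plates.drop j = plates.getD j 0 :: plates.drop (j + 1) := by
        rw [List.getD_eq_getElem _ _ hjlt, List.drop_eq_getElem_cons hjlt]
      by_cases he : plates.getD j 0 = plates.getD i 0
      · rw [if_pos ⟨hjlt, he⟩, ih (j + 1) (by omega) (by omega), hdrop, leadRun, if_pos he]
        omega
      · rw [if_neg (fun hc => he hc.2), hdrop, leadRun, if_neg he]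
        omega
    · rw [if_neg (fun hc => by omega), List.drop_eq_nil_of_le hjge]
      simp [leadRun]

lemma runEnd_ge (plates : List Int) (n i : Nat) : ∀ (fuel j : Nat),
    j ≤ runEnd plates n i fuel j := by
  intro fuel
  induction fuel with
  | zero => intro j; rw [runEnd]
  | succ fuel ih =>
    intro j
    rw [runEnd]
    by_cases h : j < n ∧ plates.getD j 0 = plates.getD i 0
    · rw [if_pos h]
      have := ih (j + 1)
      omega
    · rw [if_neg h]

-- the outer loop accumulates exactly altRec of the remaining suffix
lemma outerLoop_eq (plates : List Int) : ∀ (fuel i : Nat) (total : Int),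
    i ≤ plates.length → plates.length - i ≤ fuel →
    outerLoop plates plates.length fuel i total = total + altRec (plates.drop i) := by
  intro fuel
  induction fuel with
  | zero =>
    intro i total hi hf
    have : i = plates.length := by omega
    subst this
    rw [outerLoop, List.drop_length]
    simp [altRec]
  | succ fuel ih =>
    intro i total hi hf
    by_cases hlt : i < plates.length
    · rw [outerLoop, if_pos hlt]
      have hdrop : plates.drop i = plates.getD i 0 :: plates.drop (i + 1) := by
        rw [List.getD_eq_getElem _ _ hlt, List.drop_eq_getElem_cons hlt]
      have hlr := leadRun_le (plates.getD i 0) (plates.drop (i + 1))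
      have hlen1 : (plates.drop (i + 1)).length = plates.length - (i + 1) := by simp
      have hre := runEnd_eq plates i plates.length (i + 1) (by omega) (by omega)
      have hj1 : runEnd plates plates.length i plates.length (i + 1) ≤ plates.length := by
        omega
      have hj2 : i + 1 ≤ runEnd plates plates.length i plates.length (i + 1) :=
        runEnd_ge _ _ _ _ _
      rw [ih _ _ hj1 (by omega)]
      have hdd : plates.drop (runEnd plates plates.length i plates.length (i + 1))
          = (plates.drop (i + 1)).drop (leadRun (plates.getD i 0) (plates.drop (i + 1))) := by
        rw [hre, List.drop_drop]
      rw [hdd, hdrop, altRec_cons', hre]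
      push_cast
      ring
    · rw [outerLoop, if_neg hlt, List.drop_eq_nil_of_le (by omega)]
      simp [altRec]

-- ===== VERDICT (by name: the statement is the Claim_ definition above) =====
theorem plates_h_spec : Claim_equal_plates_h := by
  intro plates _
  unfold Spec_plates_h plates_h_alt
  rcases plates with _ | ⟨x, t⟩
  · simp [plates_h]
  · rw [if_neg (by simp)]
    rw [outerLoop_eq (x :: t) (x :: t).length 0 0 (by omega) (by omega)]
    rw [List.drop_zero, plates_h_closed,
        altRec_closed_aux (x :: t).length _ le_rfl (by simp)]
    simp
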